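-- pv_equiv track=rewrite | github.com/andrewaucie/Leetcode | 2670-make-k-subarray-sums-equal/make-k-subarray-sums-equal.py | makeSubKSumEqual
-- ===== SOURCE A (Python) =====
-- from typing import List
--
-- def makeSubKSumEqual(arr: List[int], k: int) -> int:
--     # check how many need to equal
--     # i == (i+k)%n
--     n = len(arr)
--
--     ans = 0
--     visited = [False]*n
--
--     for i in range(n):
--         if not visited[i]:
--         # Collect elements in the current group
--             group = []
--
--             while not visited[i]:
--                 group.append(arr[i])
--                 visited[i] = True
--                 i = (i+k)%n
--         # Sort the group
--             group.sort()
--         # Find the median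
--             median = group[len(group) // 2]
--         # Calculate the cost to make all elements in the group equal to the median
--             ans += sum(abs(x - median) for x in group)
--
--     return ans
-- ===== SOURCE B (Python) =====
-- from typing import List
--
-- def makeSubKSumEqual(arr: List[int], k: int) -> int:
--     # The cycle i -> (i+k) % n partitions indices into the residue classes
--     # modulo g = gcd(n, k), so process each class arr[r], arr[r+g], ... directly.
--     n = len(arr)
--     if n == 0:
--         return 0
--     g, b = n, abs(k)
--     while b:
--         g, b = b, g % b
--     total = 0
--     for r in range(g):
--         group = sorted(arr[i] for i in range(r, n, g))
--         median = group[len(group) // 2]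
--         total += sum(abs(x - median) for x in group)
--     return total
-- ===== Notes on version B (the rewrite author's own statement) =====
-- stated objective: faster
-- what changed: B replaces A's visited-array cycle walking (repeatedly stepping i -> (i+k) % n to collect each group) with direct arithmetic grouping: the cycles are exactly the residue classes modulo g = gcd(n, k), so B computes g by Euclid's algorithm and processes the g groups arr[r], arr[r+g], ... with no visited bookkeeping and no per-element modular stepping.
import Mathlib
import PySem

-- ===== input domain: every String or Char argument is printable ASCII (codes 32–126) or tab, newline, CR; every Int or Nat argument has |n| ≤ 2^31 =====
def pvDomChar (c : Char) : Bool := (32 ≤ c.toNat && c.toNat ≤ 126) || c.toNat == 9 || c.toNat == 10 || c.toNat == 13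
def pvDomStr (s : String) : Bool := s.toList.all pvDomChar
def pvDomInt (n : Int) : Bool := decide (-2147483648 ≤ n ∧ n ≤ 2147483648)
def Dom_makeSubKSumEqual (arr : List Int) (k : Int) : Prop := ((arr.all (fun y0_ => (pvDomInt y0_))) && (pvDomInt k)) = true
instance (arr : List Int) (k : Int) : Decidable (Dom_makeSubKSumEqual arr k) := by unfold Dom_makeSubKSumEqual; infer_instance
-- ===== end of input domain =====

-- B replaces A's visited-array cycle walking with direct gcd-based residue-class grouping
-- (no visited bookkeeping, no per-element modular stepping); equivalence proved below, and the
-- timing run measured B faster by a constant factor.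

-- ===== PORT A =====
-- the inner `while not visited[i]` loop; fuel n+1 always suffices (each iteration marks a
-- fresh index visited); indices are in range in Python, so the pyGetD defaults are unreachable
def pvAWhile (arr : List Int) (k : Int) (n : Nat) :
    Nat → Int → List Bool → List Int → List Int × List Bool
  | 0, _, visited, group => (group, visited)
  | fuel+1, i, visited, group =>
    if PySem.List.pyGetD visited i false then (group, visited)
    else pvAWhile arr k n fuel (PySem.Int.mod (i + k) (n : Int))
        (PySem.List.pySetD visited i true) (group ++ [PySem.List.pyGetD arr i 0])

def makeSubKSumEqual (arr : List Int) (k : Int) : Int :=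
  let n := arr.length
  ((List.range n).foldl
    (fun (st : Int × List Bool) (i : Nat) =>
      if PySem.List.pyGetD st.2 (i : Int) false then st
      else
        let res := pvAWhile arr k n (n + 1) (i : Int) st.2 []
        let group := PySem.List.sorted res.1 (fun x => x)
        let median := PySem.List.pyGetD group ((group.length / 2 : Nat) : Int) 0
        (st.1 + (group.map (fun x => |x - median|)).sum, res.2))
    (0, List.replicate n false)).1

-- ===== PORT B =====
-- Source B's hand-written Euclid loop `while b: g, b = b, g % b`
def pvEuclid : Nat → Nat → Nat
  | a, 0 => a
  | g, b + 1 => pvEuclid (b + 1) (g % (b + 1))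
termination_by _g b => b
decreasing_by exact Nat.lt_succ_of_le (Nat.le_of_lt_succ (Nat.mod_lt _ (Nat.succ_pos b)))

def makeSubKSumEqual_alt (arr : List Int) (k : Int) : Int :=
  let n := arr.length
  if n = 0 then 0
  else
    let g := pvEuclid n k.natAbs
    (List.range g).foldl
      (fun (total : Int) (r : Nat) =>
        let group := PySem.List.sorted
          ((PySem.List.pyRange (r : Int) (n : Int) (g : Int)).map
            (fun i => PySem.List.pyGetD arr i 0)) (fun x => x)
        let median := PySem.List.pyGetD group ((group.length / 2 : Nat) : Int) 0
        total + (group.map (fun x => |x - median|)).sum)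
      0

-- ===== PRECONDITION & SPEC =====
def Spec_makeSubKSumEqual (arr : List Int) (k : Int) (out : Int) : Prop := out = makeSubKSumEqual_alt arr k
instance (arr : List Int) (k : Int) (out : Int) : Decidable (Spec_makeSubKSumEqual arr k out) := by unfold Spec_makeSubKSumEqual; infer_instance

-- ===== CLAIM (what is proved, stated in full; the proofs are below) =====
def Claim_equal_makeSubKSumEqual : Prop := ∀ (arr : List Int) (k : Int), Dom_makeSubKSumEqual arr k → Spec_makeSubKSumEqual arr k (makeSubKSumEqual arr k)

-- ===== LEMMAS AND PROOFS =====
def pvKK (arr : List Int) (k : Int) : Nat := (PySem.Int.mod k (arr.length : Int)).toNat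
def pvG (arr : List Int) (k : Int) : Nat := Nat.gcd arr.length (pvKK arr k)
def pvL (arr : List Int) (k : Int) : Nat := arr.length / pvG arr k
def pvO (arr : List Int) (k : Int) (r t : Nat) : Nat := (r + t * pvKK arr k) % arr.length

lemma pvKK_cast (arr : List Int) (k : Int) (h : 0 < arr.length) :
    (pvKK arr k : Int) = k % (arr.length : Int) := by
  have h1 : (0:Int) < (arr.length : Int) := by exact_mod_cast h
  have h2 := PySem.Int.mod_nonneg (a := k) h1
  unfold pvKK
  rw [PySem.Int.mod_eq_emod_of_pos h1] at h2 ⊢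
  omega

lemma pvG_pos (arr : List Int) (k : Int) (h : 0 < arr.length) : 0 < pvG arr k :=
  Nat.gcd_pos_of_pos_left _ h

lemma pvG_dvd_n (arr : List Int) (k : Int) : pvG arr k ∣ arr.length := Nat.gcd_dvd_left _ _
lemma pvG_dvd_kk (arr : List Int) (k : Int) : pvG arr k ∣ pvKK arr k := Nat.gcd_dvd_right _ _

lemma pvG_le (arr : List Int) (k : Int) (h : 0 < arr.length) : pvG arr k ≤ arr.length :=
  Nat.le_of_dvd h (pvG_dvd_n arr k)

lemma pvL_mul (arr : List Int) (k : Int) : pvG arr k * pvL arr k = arr.length :=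
  Nat.mul_div_cancel' (pvG_dvd_n arr k)

lemma pvL_le (arr : List Int) (k : Int) (h : 0 < arr.length) : pvL arr k ≤ arr.length := by
  have := pvL_mul arr k; nlinarith [pvG_pos arr k h]

lemma pvEuclid_gcd_aux (arr : List Int) (k : Int) (h : 0 < arr.length) :
    Nat.gcd arr.length k.natAbs = pvG arr k := by
  have h1 : (0:Int) < (arr.length : Int) := by exact_mod_cast h
  have hcast : (pvKK arr k : Int) = k % (arr.length : Int) := pvKK_cast arr k h
  have hg : Int.gcd (k % (arr.length : Int)) (arr.length : Int) = Int.gcd k (arr.length : Int) :=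
    Int.gcd_emod k (arr.length : Int)
  unfold pvG
  have h2 : (k % (arr.length : Int)).natAbs = pvKK arr k := by omega
  unfold Int.gcd at hg
  rw [h2] at hg
  simp only [Int.natAbs_natCast] at hg
  rw [Nat.gcd_comm arr.length (pvKK arr k), Nat.gcd_comm arr.length k.natAbs, hg]

lemma pvO_lt (arr : List Int) (k : Int) (r t : Nat) (h : 0 < arr.length) :
    pvO arr k r t < arr.length := Nat.mod_lt _ h

lemma pvO_mod_g (arr : List Int) (k : Int) (r t : Nat) (hr : r < pvG arr k) :
    pvO arr k r t % pvG arr k = r := by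
  unfold pvO
  rw [Nat.mod_mod_of_dvd _ (pvG_dvd_n arr k)]
  obtain ⟨c, hc⟩ := pvG_dvd_kk arr k
  have : r + t * pvKK arr k = r + (t * c) * pvG arr k := by rw [hc]; ring
  rw [this, Nat.add_mul_mod_self_right, Nat.mod_eq_of_lt hr]

lemma pvO_succ (arr : List Int) (k : Int) (r t : Nat) :
    (pvO arr k r t + pvKK arr k) % arr.length = pvO arr k r (t+1) := by
  unfold pvO
  rw [Nat.mod_add_mod]
  congr 1; ring

lemma pvO_inj (arr : List Int) (k : Int) (r : Nat) (h : 0 < arr.length) :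
    ∀ t s : Nat, t < pvL arr k → s < pvL arr k → pvO arr k r t = pvO arr k r s → t = s := by
  have main : ∀ t s : Nat, s ≤ t → t < pvL arr k → s < pvL arr k →
      pvO arr k r t = pvO arr k r s → t = s := by
    intro t s hst ht _ he
    have hmod : r + s * pvKK arr k ≡ r + t * pvKK arr k [MOD arr.length] := by
      unfold Nat.ModEq; unfold pvO at he; omega
    have h2 : s * pvKK arr k ≡ t * pvKK arr k [MOD arr.length] :=
      (Nat.ModEq.add_left_cancel' r hmod)
    have hle : s * pvKK arr k ≤ t * pvKK arr k := Nat.mul_le_mul_right _ hst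
    have hdvd : arr.length ∣ t * pvKK arr k - s * pvKK arr k :=
      (Nat.modEq_iff_dvd' hle).mp h2
    obtain ⟨c, hc⟩ := pvG_dvd_kk arr k
    have hgpos := pvG_pos arr k h
    have hn : arr.length = pvG arr k * pvL arr k := (pvL_mul arr k).symm
    have hsub : t * pvKK arr k - s * pvKK arr k = (t - s) * pvKK arr k := (Nat.sub_mul t s _).symm
    rw [hsub, hc, hn] at hdvd
    have hdvd2 : pvG arr k * pvL arr k ∣ pvG arr k * ((t - s) * c) := by
      have : (t - s) * (pvG arr k * c) = pvG arr k * ((t - s) * c) := by ring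
      rwa [this] at hdvd
    have hL : pvL arr k ∣ (t - s) * c := (Nat.mul_dvd_mul_iff_left hgpos).mp hdvd2
    have hcdiv : pvKK arr k / pvG arr k = c := by rw [hc]; exact Nat.mul_div_cancel_left c hgpos
    have hcop : (pvL arr k).Coprime c := by
      have h3 := Nat.coprime_div_gcd_div_gcd (m := arr.length) (n := pvKK arr k) hgpos
      have hLdef : pvL arr k = arr.length / pvG arr k := rfl
      rw [hLdef, ← hcdiv]
      exact h3
    have hfin := hcop.dvd_of_dvd_mul_right hL
    rcases Nat.eq_zero_or_pos (t - s) with h0 | hp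
    · omega
    · have := Nat.le_of_dvd hp hfin; omega
  intro t s ht hs he
  rcases Nat.le_total s t with hle | hle
  · exact main t s hle ht hs he
  · exact (main s t hle hs ht he.symm).symm

lemma pvO_L (arr : List Int) (k : Int) (r : Nat) (hr : r < pvG arr k) (h : 0 < arr.length) :
    pvO arr k r (pvL arr k) = r := by
  obtain ⟨c, hc⟩ := pvG_dvd_kk arr k
  have hn : pvG arr k * pvL arr k = arr.length := pvL_mul arr k
  unfold pvO
  have : r + pvL arr k * pvKK arr k = r + arr.length * c := by rw [hc, ← hn]; ring
  rw [this, Nat.add_mul_mod_self_left,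
    Nat.mod_eq_of_lt (lt_of_lt_of_le hr (pvG_le arr k h))]

def pvOrbitL (arr : List Int) (k : Int) (r : Nat) : List Nat :=
  (List.range (pvL arr k)).map (pvO arr k r)
def pvTL (arr : List Int) (k : Int) (r : Nat) : List Nat :=
  (List.range (pvL arr k)).map (fun q => r + q * pvG arr k)

lemma mem_pvTL (arr : List Int) (k : Int) (r j : Nat) (hr : r < pvG arr k) (h : 0 < arr.length) :
    j ∈ pvTL arr k r ↔ j < arr.length ∧ j % pvG arr k = r := by
  have hn : pvG arr k * pvL arr k = arr.length := pvL_mul arr k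
  have hgpos := pvG_pos arr k h
  unfold pvTL
  simp only [List.mem_map, List.mem_range]
  constructor
  · rintro ⟨q, hq, rfl⟩
    constructor
    · calc r + q * pvG arr k < pvG arr k + q * pvG arr k := by omega
        _ = (q + 1) * pvG arr k := by ring
        _ ≤ pvL arr k * pvG arr k := Nat.mul_le_mul_right _ (by omega)
        _ = arr.length := by rw [← hn]; ring
    · rw [Nat.add_mul_mod_self_right, Nat.mod_eq_of_lt hr]
  · rintro ⟨hjn, hjm⟩
    refine ⟨j / pvG arr k, ?_, ?_⟩
    · have : j < pvG arr k * pvL arr k := by omega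
      exact Nat.div_lt_of_lt_mul (by omega)
    · have h5 := Nat.div_add_mod j (pvG arr k)
      have h6 : pvG arr k * (j / pvG arr k) = (j / pvG arr k) * pvG arr k := Nat.mul_comm _ _
      omega

lemma nodup_pvTL (arr : List Int) (k : Int) (r : Nat) (h : 0 < arr.length) :
    (pvTL arr k r).Nodup := by
  have hgpos := pvG_pos arr k h
  unfold pvTL
  refine (List.nodup_range).map_on ?_
  intro x _ y _ hxy
  have : x * pvG arr k = y * pvG arr k := by omega
  exact Nat.eq_of_mul_eq_mul_right hgpos this

lemma nodup_pvOrbitL (arr : List Int) (k : Int) (r : Nat) (h : 0 < arr.length) :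
    (pvOrbitL arr k r).Nodup := by
  unfold pvOrbitL
  refine (List.nodup_range).map_on ?_
  intro x hx y hy hxy
  exact pvO_inj arr k r h x y (List.mem_range.mp hx) (List.mem_range.mp hy) hxy

lemma orbit_perm_TL (arr : List Int) (k : Int) (r : Nat) (hr : r < pvG arr k) (h : 0 < arr.length) :
    (pvOrbitL arr k r).Perm (pvTL arr k r) := by
  apply List.perm_of_nodup_nodup_toFinset_eq (nodup_pvOrbitL arr k r h) (nodup_pvTL arr k r h)
  have hsub : (pvOrbitL arr k r).toFinset ⊆ (pvTL arr k r).toFinset := by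
    intro j hj
    rw [List.mem_toFinset] at hj ⊢
    unfold pvOrbitL at hj
    simp only [List.mem_map, List.mem_range] at hj
    obtain ⟨t, _, rfl⟩ := hj
    exact (mem_pvTL arr k r _ hr h).mpr ⟨pvO_lt arr k r t h, pvO_mod_g arr k r t hr⟩
  apply Finset.eq_of_subset_of_card_le hsub
  rw [List.toFinset_card_of_nodup (nodup_pvOrbitL arr k r h),
      List.toFinset_card_of_nodup (nodup_pvTL arr k r h)]
  simp [pvOrbitL, pvTL]

lemma mem_pvOrbitL (arr : List Int) (k : Int) (r j : Nat) (hr : r < pvG arr k) (h : 0 < arr.length) :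
    j ∈ pvOrbitL arr k r ↔ j < arr.length ∧ j % pvG arr k = r := by
  rw [(orbit_perm_TL arr k r hr h).mem_iff, mem_pvTL arr k r j hr h]

def pvVis (arr : List Int) (k : Int) (r m : Nat) : List Bool :=
  (List.range arr.length).map
    (fun j => decide (j % pvG arr k < r ∨ j ∈ (List.range m).map (pvO arr k r)))

def pvGrp (arr : List Int) (k : Int) (r m : Nat) : List Int :=
  (List.range m).map (fun t => PySem.List.pyGetD arr ((pvO arr k r t : Nat) : Int) 0)

lemma pvGetD_map_range {β : Type} [Inhabited β] (f : Nat → β) (n j : Nat) (d : β) (hj : j < n) :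
    PySem.List.pyGetD ((List.range n).map f) (j : Int) d = f j := by
  rw [PySem.List.pyGetD_natCast, PySem.List.getD_map_range f n j d hj]

lemma pvSet_map_range {β : Type} (f : Nat → β) (n j : Nat) (v : β) :
    ((List.range n).map f).set j v = (List.range n).map (fun x => if x = j then v else f x) := by
  apply List.ext_getElem
  · simp
  · intro i h1 h2
    simp only [List.getElem_set, List.getElem_map, List.getElem_range]
    simp only [List.length_set, List.length_map, List.length_range] at h1
    by_cases hij : i = j
    · simp [hij]
    · simp [hij, Ne.symm hij]

lemma pvStep (arr : List Int) (k : Int) (i : Nat) (h : 0 < arr.length) :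
    PySem.Int.mod ((i : Int) + k) (arr.length : Int)
      = (((i + pvKK arr k) % arr.length : Nat) : Int) := by
  have h1 : (0:Int) < (arr.length : Int) := by exact_mod_cast h
  rw [PySem.Int.mod_eq_emod_of_pos h1]
  have hsplit : (i : Int) + k
      = ((i : Int) + (pvKK arr k : Int)) + (arr.length : Int) * (k / (arr.length : Int)) := by
    have h2 := Int.mul_ediv_add_emod k (arr.length : Int)
    have h3 := pvKK_cast arr k h
    omega
  rw [hsplit, Int.add_mul_emod_self_left]
  push_cast
  ring_nf

lemma pvVis_succ (arr : List Int) (k : Int) (r t : Nat) :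
    PySem.List.pySetD (pvVis arr k r t) ((pvO arr k r t : Nat) : Int) true = pvVis arr k r (t+1) := by
  rw [PySem.List.pySetD_natCast]
  unfold pvVis
  rw [pvSet_map_range]
  apply List.map_congr_left
  intro j hj
  by_cases hje : j = pvO arr k r t
  · subst hje
    simp only [List.range_succ, List.map_append, List.mem_append]
    simp
  · simp only [if_neg hje]
    congr 1
    simp only [List.range_succ, List.map_append, List.mem_append, List.map_cons, List.map_nil,
      List.mem_cons, List.not_mem_nil, or_false, eq_iff_iff]
    constructor
    · intro hx; rcases hx with hx | hx
      · exact Or.inl hx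
      · exact Or.inr (Or.inl hx)
    · intro hx; rcases hx with hx | hx | hx
      · exact Or.inl hx
      · exact Or.inr hx
      · exact (hje hx).elim

lemma pvAWhile_run (arr : List Int) (k : Int) (r : Nat) (hr : r < pvG arr k) (h : 0 < arr.length) :
    ∀ d t, t ≤ pvL arr k → pvL arr k - t = d →
      pvAWhile arr k arr.length (arr.length + 1 - t) ((pvO arr k r t : Nat) : Int)
          (pvVis arr k r t) (pvGrp arr k r t)
        = (pvGrp arr k r (pvL arr k), pvVis arr k r (pvL arr k)) := by
  intro d
  induction d with
  | zero =>
    intro t ht hd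
    have htL : t = pvL arr k := by omega
    subst htL
    have hfuel : arr.length + 1 - pvL arr k = (arr.length - pvL arr k) + 1 := by
      have := pvL_le arr k h; omega
    rw [hfuel]
    have hOL : pvO arr k r (pvL arr k) = r := pvO_L arr k r hr h
    simp only [pvAWhile]
    rw [hOL]
    have hrn : r < arr.length := lt_of_lt_of_le hr (pvG_le arr k h)
    have hget : PySem.List.pyGetD (pvVis arr k r (pvL arr k)) ((r : Nat) : Int) false = true := by
      unfold pvVis
      rw [pvGetD_map_range _ _ _ _ hrn]
      have : r ∈ (List.range (pvL arr k)).map (pvO arr k r) :=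
        (mem_pvOrbitL arr k r r hr h).mpr ⟨hrn, Nat.mod_eq_of_lt hr⟩
      simp [this]
    rw [hget]
    simp
  | succ d ih =>
    intro t ht hd
    have htL : t < pvL arr k := by omega
    have hfuel : arr.length + 1 - t = (arr.length - t) + 1 := by
      have := pvL_le arr k h; omega
    rw [hfuel]
    simp only [pvAWhile]
    have hOlt : pvO arr k r t < arr.length := pvO_lt arr k r t h
    have hget : PySem.List.pyGetD (pvVis arr k r t) ((pvO arr k r t : Nat) : Int) false = false := by
      unfold pvVis
      rw [pvGetD_map_range _ _ _ _ hOlt]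
      simp only [decide_eq_false_iff_not, not_or]
      constructor
      · rw [pvO_mod_g arr k r t hr]; omega
      · intro hmem
        simp only [List.mem_map, List.mem_range] at hmem
        obtain ⟨s, hs, hse⟩ := hmem
        have := pvO_inj arr k r h s t (by omega) htL hse
        omega
    rw [hget]
    simp only [Bool.false_eq_true, if_false]
    have e1 : PySem.Int.mod (((pvO arr k r t : Nat) : Int) + k) (arr.length : Int)
        = ((pvO arr k r (t+1) : Nat) : Int) := by
      rw [pvStep arr k _ h, pvO_succ arr k r t]
    have e2 := pvVis_succ arr k r t
    have e3 : pvGrp arr k r t ++ [PySem.List.pyGetD arr ((pvO arr k r t : Nat) : Int) 0]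
        = pvGrp arr k r (t+1) := by
      unfold pvGrp
      rw [List.range_succ, List.map_append]
      simp
    rw [e1, e2, e3]
    have hfuel2 : arr.length - t = arr.length + 1 - (t+1) := by omega
    rw [hfuel2]
    exact ih (t+1) (by omega) (by omega)

def pvCost (l : List Int) : Int :=
  let s := PySem.List.sorted l (fun x => x)
  let med := PySem.List.pyGetD s ((s.length / 2 : Nat) : Int) 0
  (s.map (fun x => |x - med|)).sum

lemma pvVis_zero (arr : List Int) (k : Int) (r : Nat) :
    pvVis arr k r 0 = (List.range arr.length).map (fun j => decide (j % pvG arr k < r)) := by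
  unfold pvVis; simp

lemma pvVis_full (arr : List Int) (k : Int) (r : Nat) (hr : r < pvG arr k) (h : 0 < arr.length) :
    pvVis arr k r (pvL arr k)
      = (List.range arr.length).map (fun j => decide (j % pvG arr k < r + 1)) := by
  unfold pvVis
  apply List.map_congr_left
  intro j hj
  have hjn : j < arr.length := List.mem_range.mp hj
  have hmem := mem_pvOrbitL arr k r j hr h
  unfold pvOrbitL at hmem
  have hmod : j % pvG arr k < pvG arr k := Nat.mod_lt _ (pvG_pos arr k h)
  simp only [decide_eq_decide]
  rw [hmem]
  omega

lemma pvGrp_zero (arr : List Int) (k : Int) (r : Nat) : pvGrp arr k r 0 = [] := by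
  unfold pvGrp; simp

lemma pvO_zero (arr : List Int) (k : Int) (r : Nat) (hr : r < arr.length) :
    pvO arr k r 0 = r := by
  unfold pvO; simp [Nat.mod_eq_of_lt hr]

lemma pvOuterInv (arr : List Int) (k : Int) (h : 0 < arr.length) :
    ∀ m, m ≤ arr.length →
      (List.range m).foldl
        (fun (st : Int × List Bool) (i : Nat) =>
          if PySem.List.pyGetD st.2 (i : Int) false then st
          else
            let res := pvAWhile arr k arr.length (arr.length + 1) (i : Int) st.2 []
            let group := PySem.List.sorted res.1 (fun x => x)
            let median := PySem.List.pyGetD group ((group.length / 2 : Nat) : Int) 0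
            (st.1 + (group.map (fun x => |x - median|)).sum, res.2))
        (0, List.replicate arr.length false)
      = ((List.range (min m (pvG arr k))).foldl
            (fun a r => a + pvCost (pvGrp arr k r (pvL arr k))) 0,
         (List.range arr.length).map (fun j => decide (j % pvG arr k < m))) := by
  intro m
  induction m with
  | zero =>
    intro _
    simp only [List.range_zero, List.foldl_nil, Nat.zero_min]
    refine Prod.ext rfl ?_
    apply List.ext_getElem
    · simp
    · intro i h1 h2
      simp
  | succ m ih =>
    intro hm
    rw [List.range_succ, List.foldl_append, ih (by omega), List.foldl_cons, List.foldl_nil]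
    have hmn : m < arr.length := by omega
    by_cases hmg : m < pvG arr k
    · -- new group started at r = m
      have hmodm : m % pvG arr k = m := Nat.mod_eq_of_lt hmg
      have hget : PySem.List.pyGetD
          ((List.range arr.length).map (fun j => decide (j % pvG arr k < m))) ((m : Nat) : Int) false
          = false := by
        rw [pvGetD_map_range _ _ _ _ hmn, hmodm]
        simp
      rw [hget]
      simp only [Bool.false_eq_true, if_false]
      have hrun := pvAWhile_run arr k m hmg h (pvL arr k) 0 (by omega) (by omega)
      rw [pvVis_zero, pvGrp_zero, pvO_zero arr k m hmn] at hrun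
      simp only [Nat.sub_zero] at hrun
      rw [hrun]
      have hv := pvVis_full arr k m hmg h
      rw [hv]
      have hmin1 : min (m+1) (pvG arr k) = m + 1 := by omega
      have hmin2 : min m (pvG arr k) = m := by omega
      rw [hmin1, hmin2, List.range_succ, List.foldl_append, List.foldl_cons, List.foldl_nil]
      rfl
    · -- i = m already visited
      have hmod : m % pvG arr k < pvG arr k := Nat.mod_lt _ (pvG_pos arr k h)
      have hget : PySem.List.pyGetD
          ((List.range arr.length).map (fun j => decide (j % pvG arr k < m))) ((m : Nat) : Int) false
          = true := by
        rw [pvGetD_map_range _ _ _ _ hmn]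
        simp only [decide_eq_true_eq]
        omega
      rw [hget]
      simp only [if_true]
      have hmin : min (m+1) (pvG arr k) = min m (pvG arr k) := by omega
      rw [hmin]
      congr 1
      apply List.map_congr_left
      intro j hj
      simp only [decide_eq_decide]
      have : j % pvG arr k < pvG arr k := Nat.mod_lt _ (pvG_pos arr k h)
      omega

lemma pvEuclid_eq : ∀ b a : Nat, pvEuclid a b = Nat.gcd b a := by
  intro b
  induction b using Nat.strong_induction_on with
  | _ b ih =>
    intro a
    match b with
    | 0 => simp [pvEuclid]
    | b + 1 =>
      rw [pvEuclid, ih (a % (b+1)) (Nat.mod_lt _ (Nat.succ_pos b))]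
      exact (Nat.gcd_rec _ _).symm

lemma pvRange_eq (arr : List Int) (k : Int) (r : Nat) (hr : r < pvG arr k) (h : 0 < arr.length) :
    PySem.List.pyRange (r : Int) (arr.length : Int) (pvG arr k : Int)
      = (pvTL arr k r).map (fun (j : Nat) => (j : Int)) := by
  have hgpos := pvG_pos arr k h
  have hgposI : (0:Int) < (pvG arr k : Int) := by exact_mod_cast hgpos
  have hrn : r < arr.length := lt_of_lt_of_le hr (pvG_le arr k h)
  rw [PySem.List.pyRange_of_pos _ _ hgposI]
  have hif : ((r:Int) < (arr.length:Int)) := by exact_mod_cast hrn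
  rw [if_pos hif]
  have hLg : pvL arr k * pvG arr k = arr.length := by
    rw [Nat.mul_comm]; exact pvL_mul arr k
  have h1 : ((arr.length:Int) - r + (pvG arr k : Int) - 1)
      = ((arr.length - r + pvG arr k - 1 : Nat) : Int) := by omega
  have h2 : (arr.length - r + pvG arr k - 1) / pvG arr k = pvL arr k := by
    apply Nat.div_eq_of_lt_le
    · omega
    · have : (pvL arr k + 1) * pvG arr k = pvL arr k * pvG arr k + pvG arr k := by ring
      omega
  have h3 : (((arr.length:Int) - r + (pvG arr k : Int) - 1) / (pvG arr k : Int)).toNat = pvL arr k := by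
    rw [h1, Int.ofNat_ediv_ofNat, Int.toNat_natCast, h2]
  rw [h3]
  unfold pvTL
  rw [List.map_map]
  apply List.map_congr_left
  intro q _
  simp only [Function.comp_apply]
  push_cast
  ring

lemma pvSorted_eq (arr : List Int) (k : Int) (r : Nat) (hr : r < pvG arr k) (h : 0 < arr.length) :
    PySem.List.sorted
        ((PySem.List.pyRange (r : Int) (arr.length : Int) (pvG arr k : Int)).map
          (fun i => PySem.List.pyGetD arr i 0)) (fun x => x)
      = PySem.List.sorted (pvGrp arr k r (pvL arr k)) (fun x => x) := by
  rw [pvRange_eq arr k r hr h, List.map_map]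
  have hA : pvGrp arr k r (pvL arr k)
      = (pvOrbitL arr k r).map (fun (j : Nat) => PySem.List.pyGetD arr ((j : Nat) : Int) 0) := by
    unfold pvGrp pvOrbitL
    rw [List.map_map]
    rfl
  rw [hA]
  apply PySem.List.sorted_eq_sorted_of_perm _ _ _ (fun a b hab => hab)
  exact ((orbit_perm_TL arr k r hr h).map _).symm

theorem pvMain (arr : List Int) (k : Int) :
    makeSubKSumEqual arr k = makeSubKSumEqual_alt arr k := by
  simp only [makeSubKSumEqual, makeSubKSumEqual_alt]
  by_cases h : arr.length = 0
  · simp [h]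
  · have hpos : 0 < arr.length := Nat.pos_of_ne_zero h
    simp only [if_neg h]
    have hg : pvEuclid arr.length k.natAbs = pvG arr k := by
      rw [pvEuclid_eq, Nat.gcd_comm]
      exact pvEuclid_gcd_aux arr k hpos
    rw [pvOuterInv arr k hpos arr.length (le_refl _)]
    simp only [Nat.min_eq_right (pvG_le arr k hpos), hg]
    apply PySem.List.foldl_congr_mem
    intro a r hr
    have hrg : r < pvG arr k := List.mem_range.mp hr
    simp only [pvSorted_eq arr k r hrg hpos]
    rfl

-- ===== VERDICT (by name: the statement is the Claim_ definition above) =====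
theorem makeSubKSumEqual_spec : Claim_equal_makeSubKSumEqual := by
  intro arr k _
  unfold Spec_makeSubKSumEqual
  exact pvMain arr k
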